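-- pv_equiv track=rewrite | github.com/spacesheet/algorithm-for-codingtest | String/BOJ1316.py | group_word_checker
-- ===== SOURCE A (Python) =====
-- def group_word_checker(word : str) -> bool :
--     word_set = set()
--     before = word[0]
--     word_set.add(before)
--
--     for w in range(1, len(word)) :
--         if word[w] not in word_set :
--             word_set.add(word[w])
--
--             before = word[w]
--             continue
--
--         if before != word[w] :
--             return False
--
--         before = word[w]
--
--     return True
-- ===== SOURCE B (Python) =====
-- def group_word_checker(word: str) -> bool:
--     groups = [word[0]] + [c for p, c in zip(word, word[1:]) if c != p]
--     return len(groups) == len(set(groups))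
-- ===== Notes on version B (the rewrite author's own statement) =====
-- stated objective: idiomatic
-- what changed: Replaces A's interleaved seen-set/prev-char loop with early return by a two-phase computation: compress the word into its run-start characters via a zip comprehension, then check uniqueness by comparing the list's length with its set's size.
import Mathlib
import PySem

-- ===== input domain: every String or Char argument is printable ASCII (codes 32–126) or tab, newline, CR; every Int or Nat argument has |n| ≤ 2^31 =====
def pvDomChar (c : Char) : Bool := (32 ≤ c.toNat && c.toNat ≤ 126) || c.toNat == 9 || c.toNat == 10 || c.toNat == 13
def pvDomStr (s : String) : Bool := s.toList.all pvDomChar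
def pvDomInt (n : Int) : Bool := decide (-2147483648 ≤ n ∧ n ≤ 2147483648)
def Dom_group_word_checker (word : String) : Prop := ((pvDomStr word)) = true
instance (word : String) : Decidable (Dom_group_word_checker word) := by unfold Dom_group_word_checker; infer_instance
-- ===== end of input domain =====

-- B replaces A's interleaved seen-set/prev-char loop (early return) by run-compression via a
-- zip comprehension followed by a length-vs-set-size uniqueness check (idiomatic, same cost).


-- ===== PORT A =====
-- the for-loop over range(1, len(word)) with its early `return False`
def gwLoop (wordSet : PySem.Set Char) (before : Char) : List Char → Bool
  | [] => true
  | w :: rest =>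
    if !(PySem.Set.contains wordSet w) then gwLoop (PySem.Set.add wordSet w) w rest
    else if before != w then false
    else gwLoop wordSet w rest

def group_word_checker (word : String) : Bool :=
  match word.toList with
  | [] => true   -- Python raises IndexError here (word[0]); excluded by Pre_
  | b :: rest => gwLoop (PySem.Set.add PySem.Set.empty b) b rest

-- ===== PORT B =====
def group_word_checker_alt (word : String) : Bool :=
  match word.toList with
  | [] => true   -- Python raises IndexError here (word[0]); excluded by Pre_
  | b :: rest =>
    -- groups = [word[0]] + [c for p, c in zip(word, word[1:]) if c != p]
    let groups := b :: (((b :: rest).zip rest).filter (fun p => p.2 != p.1)).map Prod.snd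
    -- len(groups) == len(set(groups))
    groups.length == (PySem.Set.ofList groups).length

-- ===== PRECONDITION & SPEC =====
-- Pre_ excludes only the empty string, on which both A and B raise IndexError via word[0].
def Pre_group_word_checker (word : String) : Prop := word.toList ≠ []
instance (word : String) : Decidable (Pre_group_word_checker word) := by unfold Pre_group_word_checker; infer_instance
def pvWitness_group_word_checker : String := "aabba"

def Spec_group_word_checker (word : String) (out : Bool) : Prop := out = group_word_checker_alt word
instance (word : String) (out : Bool) : Decidable (Spec_group_word_checker word out) := by unfold Spec_group_word_checker; infer_instance

-- ===== CLAIM (what is proved, stated in full; the proofs are below) =====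
def Claim_equal_group_word_checker : Prop := ∀ (word : String), Dom_group_word_checker word → Pre_group_word_checker word → Spec_group_word_checker word (group_word_checker word)

-- ===== LEMMAS AND PROOFS =====

-- the run-start characters of `rest`, given the character `b` preceding `rest`
def runStarts (b : Char) : List Char → List Char
  | [] => []
  | w :: r => if w == b then runStarts b r else w :: runStarts w r

-- A's loop returns true iff the upcoming run starts are distinct and all unseen
lemma gwLoop_eq (rest : List Char) : ∀ (seen : PySem.Set Char) (before : Char), before ∈ seen →
    gwLoop seen before rest
      = decide ((runStarts before rest).Nodup ∧ ∀ c ∈ runStarts before rest, c ∉ seen) := by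
  induction rest with
  | nil => intro seen before _; simp [gwLoop, runStarts]
  | cons w r ih =>
    intro seen before hb
    by_cases hw : w ∈ seen
    · by_cases hbw : before = w
      · subst hbw
        have h1 : gwLoop seen before (before :: r) = gwLoop seen before r := by
          simp [gwLoop, hw]
        have h2 : runStarts before (before :: r) = runStarts before r := by
          simp [runStarts]
        rw [h1, h2, ih seen before hb]
      · have h1 : gwLoop seen before (w :: r) = false := by
          simp [gwLoop, hw, hbw]
        have h2 : runStarts before (w :: r) = w :: runStarts w r := by
          simp [runStarts, show ¬ w = before from fun h => hbw h.symm]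
        rw [h1, h2]
        symm
        simp only [decide_eq_false_iff_not, not_and]
        intro _ h2'
        exact h2' w (by simp) hw
    · have hbw : w ≠ before := fun h => hw (h ▸ hb)
      have h1 : gwLoop seen before (w :: r) = gwLoop (PySem.Set.add seen w) w r := by
        simp [gwLoop, hw]
      have h2 : runStarts before (w :: r) = w :: runStarts w r := by
        simp [runStarts, hbw]
      rw [h1, h2, ih (PySem.Set.add seen w) w (by simp [PySem.Set.mem_add])]
      apply decide_eq_decide.mpr
      simp only [List.nodup_cons, List.mem_cons, PySem.Set.mem_add]
      constructor
      · rintro ⟨h1', h2'⟩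
        refine ⟨⟨fun hwmem => (h2' w hwmem (Or.inr rfl)).elim, h1'⟩, ?_⟩
        rintro c (rfl | hc') hcs
        · exact hw hcs
        · exact h2' c hc' (Or.inl hcs)
      · rintro ⟨⟨hwn, h1'⟩, h2'⟩
        refine ⟨h1', fun c hc' hcs => ?_⟩
        rcases hcs with hcs' | rfl
        · exact h2' c (Or.inr hc') hcs'
        · exact hwn hc'

-- B's zip comprehension computes exactly the run starts
lemma zip_filter_eq_runStarts (rest : List Char) : ∀ b : Char,
    (((b :: rest).zip rest).filter (fun p => p.2 != p.1)).map Prod.snd = runStarts b rest := by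
  induction rest with
  | nil => intro b; simp [runStarts]
  | cons w r ih =>
    intro b
    by_cases h : w = b
    · subst h; simp [runStarts, ih w]
    · simp [runStarts, h, ih w]

lemma ofList_sublist (xs : List Char) : (PySem.Set.ofList xs).Sublist xs := by
  induction xs using List.reverseRecOn with
  | nil => simp [PySem.Set.ofList_nil]
  | append_singleton ys y ih =>
    rw [PySem.Set.ofList_append_singleton, PySem.Set.add_eq_ite]
    split
    · exact ih.trans (List.sublist_append_left ys [y])
    · exact List.Sublist.append ih (List.Sublist.refl [y])

-- len(xs) == len(set(xs)) is exactly distinctness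
lemma len_ofList_eq_iff (xs : List Char) :
    ((PySem.Set.ofList xs).length = xs.length) ↔ xs.Nodup := by
  constructor
  · intro h
    have := (ofList_sublist xs).eq_of_length h
    rw [← this]; exact PySem.Set.nodup_ofList xs
  · intro h; rw [PySem.Set.ofList_eq_self_of_nodup xs h]

-- ===== VERDICT (by name: the statement is the Claim_ definition above) =====
theorem group_word_checker_spec : Claim_equal_group_word_checker := by
  intro word _ hpre
  unfold Spec_group_word_checker group_word_checker group_word_checker_alt
  cases hcs : word.toList with
  | nil => exact absurd hcs hpre
  | cons b rest =>
    simp only [zip_filter_eq_runStarts rest b]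
    have hmem : b ∈ PySem.Set.add PySem.Set.empty b := by
      simp
    rw [gwLoop_eq rest _ b hmem]
    have hset : PySem.Set.add PySem.Set.empty b = [b] := by rfl
    rw [hset]
    set t := runStarts b rest with ht
    have hbeq : ((b :: t).length == (PySem.Set.ofList (b :: t)).length)
        = decide ((b :: t).Nodup) := by
      rw [show ((b :: t).length == (PySem.Set.ofList (b :: t)).length)
            = decide ((b :: t).length = (PySem.Set.ofList (b :: t)).length) from
        Bool.beq_eq_decide_eq _ _]
      apply decide_eq_decide.mpr
      rw [eq_comm]
      exact len_ofList_eq_iff (b :: t)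
    rw [hbeq]
    apply decide_eq_decide.mpr
    simp only [List.nodup_cons, List.mem_singleton]
    constructor
    · rintro ⟨h1, h2⟩
      exact ⟨fun hb => h2 b hb rfl, h1⟩
    · rintro ⟨hb, h1⟩
      exact ⟨h1, fun c hc hcb => hb (hcb ▸ hc)⟩
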